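-- pv_equiv track=rewrite | github.com/haimlab/HIV | src/Flu/SeveralStates.py | findNSites
-- ===== SOURCE A (Python) =====
-- def findNSites(correctSeq):
--     oneAgo = False
--     twoAgo = False
--     nSites = {0}
--     loc = 0
--     for l in correctSeq:
--         if twoAgo:
--             if l == 'S' or l == 'T':
--                 nSites.add(loc)
--             twoAgo = False
--         if oneAgo:
--             twoAgo = True
--             oneAgo = False
--         if l == 'N':
--             oneAgo = True
--         loc += 1
--
--     nSites.remove(0)
--     return nSites
-- ===== SOURCE B (Python) =====
-- def findNSites(correctSeq):
--     return {i for i in range(2, len(correctSeq))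
--             if correctSeq[i - 2] == 'N' and correctSeq[i] in ('S', 'T')}
-- ===== Notes on version B (the rewrite author's own statement) =====
-- stated objective: simpler
-- what changed: Replaced the forward state machine (oneAgo/twoAgo flags, a {0} sentinel added and removed) by a direct set comprehension over indices with look-behind indexing correctSeq[i-2].
import Mathlib
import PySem

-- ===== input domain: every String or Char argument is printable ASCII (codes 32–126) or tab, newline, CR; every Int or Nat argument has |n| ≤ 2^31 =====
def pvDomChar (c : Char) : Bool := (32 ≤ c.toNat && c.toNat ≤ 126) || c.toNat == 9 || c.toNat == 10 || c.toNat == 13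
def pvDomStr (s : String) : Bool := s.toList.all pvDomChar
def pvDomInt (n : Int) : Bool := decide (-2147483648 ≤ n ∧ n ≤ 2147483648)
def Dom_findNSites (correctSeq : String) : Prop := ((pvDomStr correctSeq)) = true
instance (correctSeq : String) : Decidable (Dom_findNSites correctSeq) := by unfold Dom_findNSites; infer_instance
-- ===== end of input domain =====

-- B replaces A's oneAgo/twoAgo state machine with its {0} sentinel by a set
-- comprehension over indices with direct look-behind indexing (simpler; same cost).

-- ===== PORT A =====
-- one iteration of A's for-loop; state = (oneAgo, twoAgo, nSites, loc)
def findNSitesStep (st : Bool × Bool × PySem.Set Int × Int) (l : Char) :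
    Bool × Bool × PySem.Set Int × Int :=
  let oneAgo := st.1
  let twoAgo := st.2.1
  let nSites := st.2.2.1
  let loc := st.2.2.2
  let nSites := if twoAgo ∧ (l = 'S' ∨ l = 'T') then PySem.Set.add nSites loc else nSites
  let twoAgo := if twoAgo then false else twoAgo
  let (twoAgo, oneAgo) := if oneAgo then (true, false) else (twoAgo, oneAgo)
  let oneAgo := if l = 'N' then true else oneAgo
  (oneAgo, twoAgo, nSites, loc + 1)

def findNSites (correctSeq : String) : List Int :=
  -- nSites.remove(0): the sentinel 0 is always present, so the KeyError branch is unreachable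
  (PySem.Set.remove?
    (correctSeq.toList.foldl findNSitesStep (false, false, PySem.Set.ofList [0], 0)).2.2.1
    0).getD []

-- ===== PORT B =====
def findNSites_alt (correctSeq : String) : List Int :=
  PySem.Set.ofList
    ((PySem.List.pyRange 2 (correctSeq.toList.length : Int) 1).filter
      (fun i => decide (PySem.List.pyGet? correctSeq.toList (i - 2) = some 'N' ∧
        (PySem.List.pyGet? correctSeq.toList i = some 'S' ∨
          PySem.List.pyGet? correctSeq.toList i = some 'T'))))

-- ===== PRECONDITION & SPEC =====
def Spec_findNSites (correctSeq : String) (out : List Int) : Prop := out = findNSites_alt correctSeq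
instance (correctSeq : String) (out : List Int) : Decidable (Spec_findNSites correctSeq out) := by unfold Spec_findNSites; infer_instance

-- ===== CLAIM (what is proved, stated in full; the proofs are below) =====
def Claim_equal_findNSites : Prop := ∀ (correctSeq : String), Dom_findNSites correctSeq → Spec_findNSites correctSeq (findNSites correctSeq)

-- ===== LEMMAS AND PROOFS =====

-- motif positions emitted from state (oneAgo = o, twoAgo = t) at position loc
def sitesSpec (o t : Bool) (loc : Int) : List Char → List Int
  | [] => []
  | l :: rest =>
      (if t ∧ (l = 'S' ∨ l = 'T') then [loc] else []) ++
        sitesSpec (decide (l = 'N')) o (loc + 1) rest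

theorem sitesSpec_lb (cs : List Char) : ∀ (o t : Bool) (loc : Int) (x : Int),
    x ∈ sitesSpec o t loc cs → loc ≤ x ∧ (x = loc → t = true) := by
  induction cs with
  | nil => intro o t loc x hx; simp [sitesSpec] at hx
  | cons l rest ih =>
      intro o t loc x hx
      simp only [sitesSpec, List.mem_append] at hx
      rcases hx with hx | hx
      · split at hx
        · rename_i h; simp at hx; subst hx; exact ⟨le_refl _, fun _ => by simpa using h.1⟩
        · simp at hx
      · have := ih (decide (l = 'N')) o (loc + 1) x hx
        exact ⟨by omega, fun h => by omega⟩

theorem foldA (cs : List Char) : ∀ (o t : Bool) (S : PySem.Set Int) (loc : Int),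
    0 ≤ loc → (t = true → 0 < loc) → (∀ x ∈ S, x < loc ∨ x = 0) →
    (cs.foldl findNSitesStep (o, t, S, loc)).2.2.1 = S ++ sitesSpec o t loc cs := by
  induction cs with
  | nil => intro o t S loc _ _ _; simp [sitesSpec]
  | cons l rest ih =>
      intro o t S loc hloc ht hS
      have hstep : findNSitesStep (o, t, S, loc) l =
          (decide (l = 'N'), o,
           (if t = true ∧ (l = 'S' ∨ l = 'T') then PySem.Set.add S loc else S), loc + 1) := by
        simp only [findNSitesStep]
        cases o <;> cases t <;> by_cases hN : l = 'N' <;> simp [hN]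
      have hSle : ∀ x ∈ (if t = true ∧ (l = 'S' ∨ l = 'T') then PySem.Set.add S loc else S),
          x < loc + 1 ∨ x = 0 := by
        intro x hx
        split at hx
        · rw [PySem.Set.mem_add] at hx
          rcases hx with hx | hx
          · rcases hS x hx with h | h
            · exact Or.inl (by omega)
            · exact Or.inr h
          · exact Or.inl (by omega)
        · rcases hS x hx with h | h
          · exact Or.inl (by omega)
          · exact Or.inr h
      have hrec := ih (decide (l = 'N')) o
          (if t = true ∧ (l = 'S' ∨ l = 'T') then PySem.Set.add S loc else S) (loc + 1)
          (by omega) (fun _ => by omega) hSle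
      have hadd : (if t = true ∧ (l = 'S' ∨ l = 'T') then PySem.Set.add S loc else S) =
          S ++ (if t = true ∧ (l = 'S' ∨ l = 'T') then [loc] else []) := by
        split
        · rename_i h
          have hnot : loc ∉ S := by
            intro hmem
            rcases hS loc hmem with h' | h'
            · omega
            · have := ht (by simpa using h.1); omega
          exact PySem.Set.add_of_not_mem hnot
        · simp
      rw [List.foldl_cons, hstep, hrec, hadd, List.append_assoc]
      simp only [sitesSpec]

theorem filtB (cs : List Char) : ∀ (n k : Nat), 2 ≤ k → k ≤ cs.length →
    cs.length - k = n →
    ((PySem.List.pyRange (k : Int) ((cs.length : Nat) : Int) 1).filter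
      (fun i => decide (PySem.List.pyGet? cs (i - 2) = some 'N' ∧
        (PySem.List.pyGet? cs i = some 'S' ∨ PySem.List.pyGet? cs i = some 'T')))) =
      sitesSpec (decide (cs.getD (k - 1) 'A' = 'N')) (decide (cs.getD (k - 2) 'A' = 'N'))
        (k : Int) (cs.drop k) := by
  intro n
  induction n with
  | zero =>
      intro k h2 hle hn
      have hk : k = cs.length := by omega
      subst hk
      rw [PySem.List.pyRange_one_eq_nil (le_refl _)]
      simp [sitesSpec, List.drop_of_length_le]
  | succ n ihn =>
      intro k h2 hle hn
      have hklt : k < cs.length := by omega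
      rw [PySem.List.pyRange_one_cons (by exact_mod_cast hklt)]
      have hdrop : cs.drop k = cs[k] :: cs.drop (k + 1) :=
        List.drop_eq_getElem_cons hklt
      have hget : PySem.List.pyGet? cs ((k : Int)) = some cs[k] := by
        rw [PySem.List.pyGet?_natCast]
        exact List.getElem?_eq_getElem hklt
      have hlt2 : k - 2 < cs.length := by omega
      have hk2 : (k : Int) - 2 = ((k - 2 : Nat) : Int) := by omega
      have hget2 : PySem.List.pyGet? cs ((k : Int) - 2) = some (cs.getD (k - 2) 'A') := by
        rw [hk2, PySem.List.pyGet?_natCast, List.getD_eq_getElem cs 'A' hlt2]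
        exact List.getElem?_eq_getElem hlt2
      have hcast : (k : Int) + 1 = ((k + 1 : Nat) : Int) := by push_cast; ring
      have ihk := ihn (k + 1) (by omega) (by omega) (by omega)
      have htail :
          ((PySem.List.pyRange ((k : Int) + 1) ((cs.length : Nat) : Int) 1).filter
            (fun i => decide (PySem.List.pyGet? cs (i - 2) = some 'N' ∧
              (PySem.List.pyGet? cs i = some 'S' ∨ PySem.List.pyGet? cs i = some 'T')))) =
          sitesSpec (decide (cs[k] = 'N')) (decide (cs.getD (k - 1) 'A' = 'N'))
            ((k : Int) + 1) (cs.drop (k + 1)) := by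
        rw [hcast, ihk]
        have e1 : k + 1 - 1 = k := by omega
        have e2 : k + 1 - 2 = k - 1 := by omega
        rw [e1, e2, List.getD_eq_getElem cs 'A' hklt]
      simp only [List.filter_cons]
      rw [hdrop]
      by_cases hc : cs.getD (k - 2) 'A' = 'N' ∧ (cs[k] = 'S' ∨ cs[k] = 'T')
      · have hcond : (decide (PySem.List.pyGet? cs ((k : Int) - 2) = some 'N' ∧
            (PySem.List.pyGet? cs (k : Int) = some 'S' ∨
              PySem.List.pyGet? cs (k : Int) = some 'T'))) = true := by
          rw [hget2, hget]
          simp only [Option.some.injEq, decide_eq_true_eq]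
          exact hc
        rw [if_pos hcond]
        simp only [sitesSpec]
        rw [if_pos ⟨by simpa using hc.1, hc.2⟩, htail]
        simp
      · have hcond : (decide (PySem.List.pyGet? cs ((k : Int) - 2) = some 'N' ∧
            (PySem.List.pyGet? cs (k : Int) = some 'S' ∨
              PySem.List.pyGet? cs (k : Int) = some 'T'))) = false := by
          rw [hget2, hget]
          simp only [Option.some.injEq, decide_eq_false_iff_not]
          exact hc
        rw [if_neg (by rw [hcond]; exact Bool.false_ne_true)]
        simp only [sitesSpec]
        rw [if_neg (by simpa using hc), htail]
        simp

theorem mainB (cs : List Char) :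
    ((PySem.List.pyRange 2 ((cs.length : Nat) : Int) 1).filter
      (fun i => decide (PySem.List.pyGet? cs (i - 2) = some 'N' ∧
        (PySem.List.pyGet? cs i = some 'S' ∨ PySem.List.pyGet? cs i = some 'T')))) =
      sitesSpec false false 0 cs := by
  match cs with
  | [] =>
      rw [PySem.List.pyRange_one_eq_nil (by norm_num)]
      rfl
  | [a] =>
      rw [PySem.List.pyRange_one_eq_nil (by norm_num)]
      simp [sitesSpec]
  | a :: b :: rest =>
      have hlen : (a :: b :: rest).length = rest.length + 2 := by simp
      have h := filtB (a :: b :: rest) ((a :: b :: rest).length - 2) 2 (by omega) (by omega) rfl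
      have hc2 : (((2 : Nat) : Int)) = (2 : Int) := by norm_num
      rw [hc2] at h
      rw [h]
      simp only [List.getD, List.drop]
      simp [sitesSpec]

theorem mainA (s : String) : findNSites s = sitesSpec false false 0 s.toList := by
  unfold findNSites
  have hfold := foldA s.toList false false (PySem.Set.ofList [0]) 0 le_rfl (by simp)
      (by intro x hx; rw [PySem.Set.mem_ofList] at hx; simp at hx; omega)
  rw [hfold]
  have h01 : PySem.Set.ofList [(0 : Int)] = [0] := rfl
  rw [h01, List.singleton_append]
  have hz : ∀ y ∈ sitesSpec false false 0 s.toList, ¬ y = (0 : Int) := by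
    intro y hy h0
    have hlb := sitesSpec_lb s.toList false false 0 y hy
    exact absurd (hlb.2 h0) (by simp)
  rw [PySem.Set.remove?_of_mem (by simp)]
  simp only [Option.getD_some, PySem.Set.discard, List.filter_cons]
  simp only [beq_self_eq_true, Bool.not_true, Bool.false_eq_true, if_false]
  rw [List.filter_eq_self.mpr]
  intro y hy
  simpa using hz y hy

theorem mainBalt (s : String) : findNSites_alt s = sitesSpec false false 0 s.toList := by
  unfold findNSites_alt
  rw [PySem.Set.ofList_eq_self_of_nodup _
    (List.Nodup.filter _ (PySem.List.nodup_pyRange_one 2 _))]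
  rw [mainB s.toList]

-- ===== VERDICT (by name: the statement is the Claim_ definition above) =====
theorem findNSites_spec : Claim_equal_findNSites := by
  intro s _
  unfold Spec_findNSites
  rw [mainA s, mainBalt s]
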